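-- pv_equiv track=rewrite | github.com/sjifire/utilities | src/sjifire/ops/chat/engine.py | _format_unit_times_table
-- ===== SOURCE A (Python) =====
-- def _format_unit_times_table(
--     unit_times: list[dict],
--     time_reported: str = "",
--     alarm_time: str = "",
-- ) -> str:
--     """Format unit response times as a readable table for the system prompt.
--
--     Two sections:
--     1. **Incident timestamps** — derived from earliest unit times plus
--        time_reported. Maps to ``update_incident(timestamps={...})``.
--     2. **Per-unit times** — each apparatus with key timestamps for review.
--        Maps to ``update_incident(units=[...])``.
--
--     The ``alarm_time`` (SJF3 PAGED) is used as the default dispatch time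
--     for all units — the page goes out once and all units respond from it.
--     Falls back to ``time_reported`` if alarm_time is empty.
--     """
--     # Default dispatch time: alarm (page) time, or call received time
--     default_dispatched = alarm_time or time_reported
--
--     def _time(iso: str) -> str:
--         """Extract HH:MM:SS from an ISO timestamp, or '--' if empty."""
--         if not iso:
--             return "--"
--         if "T" in iso:
--             iso = iso.split("T", 1)[1]
--         for sep in ("+", "Z"):
--             if sep in iso:
--                 iso = iso.split(sep, 1)[0]
--         return iso[:8]
--
--     def _earliest(field: str) -> str:
--         """Find the earliest non-empty value for a field across all units."""
--         values = [ut.get(field, "") for ut in unit_times if ut.get(field)]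
--         return min(values) if values else ""
--
--     def _latest(field: str) -> str:
--         """Find the latest non-empty value for a field across all units."""
--         values = [ut.get(field, "") for ut in unit_times if ut.get(field)]
--         return max(values) if values else ""
--
--     # --- Incident-level timestamps (→ update_incident timestamps={}) ---
--     dispatched = _earliest("paged") or default_dispatched
--     lines = [
--         "INCIDENT TIMESTAMPS (save via timestamps={...}):",
--         f"  Call Received (psap_answer):       {_time(time_reported)}",
--         f"  First Dispatched (first_unit_dispatched): {_time(dispatched)}",
--         f"  First Enroute (first_unit_enroute):    {_time(_earliest('enroute'))}",
--         f"  First On Scene (first_unit_arrived):   {_time(_earliest('arrived'))}",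
--         f"  Last Unit Cleared (last_unit_cleared):  {_time(_latest('completed'))}",
--         f"  Last In Quarters (last_unit_in_quarters): {_time(_latest('in_quarters'))}",
--     ]
--
--     # --- Per-unit times (→ update_incident units=[]) ---
--     lines.append("")
--     lines.append("UNIT RESPONSE TIMES (save via units=[...]):")
--     lines.append("(-- = missing, needs to be filled in or confirmed N/A)")
--     lines.append("(Staged = ARSTN/ARRNL, unit waiting at a location but NOT on scene)")
--     lines.append("(Use these EXACT timestamps — do NOT round or estimate)")
--     header = "Unit     | Dispatched | Enroute  | Staged   | On Scene | Cleared  | In Quarters"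
--     divider = "---------|------------|----------|----------|----------|----------|------------"
--     lines.extend([header, divider])
--     for ut in unit_times:
--         unit = (ut.get("unit") or "?").ljust(8)
--         paged = _time(ut.get("paged") or default_dispatched).ljust(10)
--         enroute = _time(ut.get("enroute", "")).ljust(8)
--         staged = _time(ut.get("staged", "")).ljust(8)
--         arrived = _time(ut.get("arrived", "")).ljust(8)
--         completed = _time(ut.get("completed", "")).ljust(8)
--         in_quarters = _time(ut.get("in_quarters", ""))
--         row = f"{unit} | {paged} | {enroute} | {staged} | {arrived} | {completed} | {in_quarters}"
--         lines.append(row)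
--
--     return "\n".join(lines)
-- ===== SOURCE B (Python) =====
-- def _format_unit_times_table(
--     unit_times: list[dict],
--     time_reported: str = "",
--     alarm_time: str = "",
-- ) -> str:
--     """Single-pass variant: one loop over unit_times builds the running
--     min/max per field instead of six separate comprehension scans."""
--     default_dispatched = alarm_time or time_reported
--
--     def _time(iso: str) -> str:
--         if not iso:
--             return "--"
--         if "T" in iso:
--             iso = iso.split("T", 1)[1]
--         for sep in ("+", "Z"):
--             if sep in iso:
--                 iso = iso.split(sep, 1)[0]
--         return iso[:8]
--
--     # One pass: running minima for paged/enroute/arrived, running maxima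
--     # for completed/in_quarters (None = field never seen non-empty).
--     min_paged = min_enroute = min_arrived = None
--     max_completed = max_in_quarters = None
--     for ut in unit_times:
--         v = ut.get("paged", "")
--         if v:
--             min_paged = v if min_paged is None else min(min_paged, v)
--         v = ut.get("enroute", "")
--         if v:
--             min_enroute = v if min_enroute is None else min(min_enroute, v)
--         v = ut.get("arrived", "")
--         if v:
--             min_arrived = v if min_arrived is None else min(min_arrived, v)
--         v = ut.get("completed", "")
--         if v:
--             max_completed = v if max_completed is None else max(max_completed, v)
--         v = ut.get("in_quarters", "")
--         if v:
--             max_in_quarters = v if max_in_quarters is None else max(max_in_quarters, v)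
--
--     dispatched = min_paged or default_dispatched
--     lines = [
--         "INCIDENT TIMESTAMPS (save via timestamps={...}):",
--         f"  Call Received (psap_answer):       {_time(time_reported)}",
--         f"  First Dispatched (first_unit_dispatched): {_time(dispatched)}",
--         f"  First Enroute (first_unit_enroute):    {_time(min_enroute or '')}",
--         f"  First On Scene (first_unit_arrived):   {_time(min_arrived or '')}",
--         f"  Last Unit Cleared (last_unit_cleared):  {_time(max_completed or '')}",
--         f"  Last In Quarters (last_unit_in_quarters): {_time(max_in_quarters or '')}",
--         "",
--         "UNIT RESPONSE TIMES (save via units=[...]):",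
--         "(-- = missing, needs to be filled in or confirmed N/A)",
--         "(Staged = ARSTN/ARRNL, unit waiting at a location but NOT on scene)",
--         "(Use these EXACT timestamps — do NOT round or estimate)",
--         "Unit     | Dispatched | Enroute  | Staged   | On Scene | Cleared  | In Quarters",
--         "---------|------------|----------|----------|----------|----------|------------",
--     ]
--     lines.extend(
--         f"{(ut.get('unit') or '?').ljust(8)} | "
--         f"{_time(ut.get('paged') or default_dispatched).ljust(10)} | "
--         f"{_time(ut.get('enroute', '')).ljust(8)} | "
--         f"{_time(ut.get('staged', '')).ljust(8)} | "
--         f"{_time(ut.get('arrived', '')).ljust(8)} | "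
--         f"{_time(ut.get('completed', '')).ljust(8)} | "
--         f"{_time(ut.get('in_quarters', ''))}"
--         for ut in unit_times
--     )
--     return "\n".join(lines)
-- ===== Notes on version B (the rewrite author's own statement) =====
-- stated objective: alternative
-- what changed: The six separate filtered list-comprehension scans (_earliest/_latest per field) are replaced by a single pass over unit_times that maintains running minima (paged/enroute/arrived) and maxima (completed/in_quarters); the header list and the per-unit rows are built in one literal plus an extend with a generator instead of repeated appends.
import Mathlib
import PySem

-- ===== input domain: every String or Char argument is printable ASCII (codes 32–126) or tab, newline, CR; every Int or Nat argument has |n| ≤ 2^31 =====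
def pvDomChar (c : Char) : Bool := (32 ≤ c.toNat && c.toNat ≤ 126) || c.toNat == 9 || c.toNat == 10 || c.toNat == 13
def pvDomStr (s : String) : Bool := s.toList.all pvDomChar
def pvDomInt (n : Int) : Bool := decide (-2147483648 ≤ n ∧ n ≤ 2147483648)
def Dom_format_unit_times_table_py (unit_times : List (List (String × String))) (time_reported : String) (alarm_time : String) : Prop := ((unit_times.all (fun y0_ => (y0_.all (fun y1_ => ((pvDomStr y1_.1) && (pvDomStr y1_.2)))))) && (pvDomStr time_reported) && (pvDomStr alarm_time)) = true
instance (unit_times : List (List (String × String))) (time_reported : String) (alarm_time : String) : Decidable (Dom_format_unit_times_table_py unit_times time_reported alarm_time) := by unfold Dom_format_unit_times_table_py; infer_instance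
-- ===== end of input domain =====

-- B replaces A's six per-field filtered scans (_earliest/_latest) by a single aggregation
-- pass over unit_times keeping running minima/maxima; same output (objective: alternative).

-- ===== shared helpers (identical code in Source A and Source B: _time, dict.get, `or`, ljust, row format) =====

-- ut.get(field, d): first-match lookup on the association list (the dict convention)
def pyDictGet (ut : List (String × String)) (field : String) (d : String) : String :=
  (List.lookup field ut).getD d

-- Python `x or alt` on a string x
def pyOrS (x alt : String) : String := if x = "" then alt else x

-- Python `o or alt` on an Optional[str] o
def optOr (o : Option String) (alt : String) : String :=
  match o with
  | none => alt
  | some v => if v = "" then alt else v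

-- s.ljust(n): exact on the ASCII domain (pad with spaces to n code points)
def pyLjust (s : String) (n : Nat) : String :=
  String.ofList (s.toList ++ List.replicate (n - s.toList.length) ' ')

-- _time: the inner indexing is guarded by the `isIn` tests, exactly as the Python's split is
def pyTime (iso : String) : String :=
  if iso = "" then "--"
  else
    let iso := if PySem.Str.isIn "T" iso then (((PySem.Str.splitMax? iso "T" 1).getD []).getD 1 "") else iso
    let iso := if PySem.Str.isIn "+" iso then (((PySem.Str.splitMax? iso "+" 1).getD []).getD 0 "") else iso
    let iso := if PySem.Str.isIn "Z" iso then (((PySem.Str.splitMax? iso "Z" 1).getD []).getD 0 "") else iso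
    PySem.Str.slice iso none (some 8)

-- the per-unit row f-string (the same expression in both Pythons)
def rowLine (default_dispatched : String) (ut : List (String × String)) : String :=
  pyLjust (optOr (List.lookup "unit" ut) "?") 8 ++ " | " ++
  pyLjust (pyTime (optOr (List.lookup "paged" ut) default_dispatched)) 10 ++ " | " ++
  pyLjust (pyTime (pyDictGet ut "enroute" "")) 8 ++ " | " ++
  pyLjust (pyTime (pyDictGet ut "staged" "")) 8 ++ " | " ++
  pyLjust (pyTime (pyDictGet ut "arrived" "")) 8 ++ " | " ++
  pyLjust (pyTime (pyDictGet ut "completed" "")) 8 ++ " | " ++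
  pyTime (pyDictGet ut "in_quarters" "")

-- ===== PORT A =====

-- _earliest: build the filtered value list, then min of it (or "")
def earliestA (unit_times : List (List (String × String))) (field : String) : String :=
  let values := (unit_times.filter (fun ut => decide (pyDictGet ut field "" ≠ ""))).map
      (fun ut => pyDictGet ut field "")
  if values = [] then "" else (PySem.List.min? values (fun x => x)).getD ""

-- _latest: same scan with max
def latestA (unit_times : List (List (String × String))) (field : String) : String :=
  let values := (unit_times.filter (fun ut => decide (pyDictGet ut field "" ≠ ""))).map
      (fun ut => pyDictGet ut field "")
  if values = [] then "" else (PySem.List.max? values (fun x => x)).getD ""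

def format_unit_times_table_py (unit_times : List (List (String × String))) (time_reported : String) (alarm_time : String) : String :=
  let default_dispatched := pyOrS alarm_time time_reported
  let dispatched := pyOrS (earliestA unit_times "paged") default_dispatched
  let lines : List String := [
    "INCIDENT TIMESTAMPS (save via timestamps={...}):",
    "  Call Received (psap_answer):       " ++ pyTime time_reported,
    "  First Dispatched (first_unit_dispatched): " ++ pyTime dispatched,
    "  First Enroute (first_unit_enroute):    " ++ pyTime (earliestA unit_times "enroute"),
    "  First On Scene (first_unit_arrived):   " ++ pyTime (earliestA unit_times "arrived"),
    "  Last Unit Cleared (last_unit_cleared):  " ++ pyTime (latestA unit_times "completed"),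
    "  Last In Quarters (last_unit_in_quarters): " ++ pyTime (latestA unit_times "in_quarters")]
  let lines := lines ++ [""]
  let lines := lines ++ ["UNIT RESPONSE TIMES (save via units=[...]):"]
  let lines := lines ++ ["(-- = missing, needs to be filled in or confirmed N/A)"]
  let lines := lines ++ ["(Staged = ARSTN/ARRNL, unit waiting at a location but NOT on scene)"]
  let lines := lines ++ ["(Use these EXACT timestamps — do NOT round or estimate)"]
  let lines := lines ++ [
    "Unit     | Dispatched | Enroute  | Staged   | On Scene | Cleared  | In Quarters",
    "---------|------------|----------|----------|----------|----------|------------"]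
  let lines := unit_times.foldl (fun acc ut => acc ++ [rowLine default_dispatched ut]) lines
  PySem.Str.join "\n" lines

-- ===== PORT B =====

-- running minimum / maximum update (skip empty values; None = not seen yet)
def updMin (o : Option String) (v : String) : Option String :=
  if v = "" then o else some (match o with | none => v | some m => min m v)
def updMax (o : Option String) (v : String) : Option String :=
  if v = "" then o else some (match o with | none => v | some m => max m v)

def format_unit_times_table_py_alt (unit_times : List (List (String × String))) (time_reported : String) (alarm_time : String) : String :=
  let default_dispatched := pyOrS alarm_time time_reported
  let agg := unit_times.foldl (fun acc ut =>
      (updMin acc.1 (pyDictGet ut "paged" ""),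
       updMin acc.2.1 (pyDictGet ut "enroute" ""),
       updMin acc.2.2.1 (pyDictGet ut "arrived" ""),
       updMax acc.2.2.2.1 (pyDictGet ut "completed" ""),
       updMax acc.2.2.2.2 (pyDictGet ut "in_quarters" "")))
      ((none, none, none, none, none) : Option String × Option String × Option String × Option String × Option String)
  let dispatched := optOr agg.1 default_dispatched
  let lines : List String := [
    "INCIDENT TIMESTAMPS (save via timestamps={...}):",
    "  Call Received (psap_answer):       " ++ pyTime time_reported,
    "  First Dispatched (first_unit_dispatched): " ++ pyTime dispatched,
    "  First Enroute (first_unit_enroute):    " ++ pyTime (optOr agg.2.1 ""),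
    "  First On Scene (first_unit_arrived):   " ++ pyTime (optOr agg.2.2.1 ""),
    "  Last Unit Cleared (last_unit_cleared):  " ++ pyTime (optOr agg.2.2.2.1 ""),
    "  Last In Quarters (last_unit_in_quarters): " ++ pyTime (optOr agg.2.2.2.2 ""),
    "",
    "UNIT RESPONSE TIMES (save via units=[...]):",
    "(-- = missing, needs to be filled in or confirmed N/A)",
    "(Staged = ARSTN/ARRNL, unit waiting at a location but NOT on scene)",
    "(Use these EXACT timestamps — do NOT round or estimate)",
    "Unit     | Dispatched | Enroute  | Staged   | On Scene | Cleared  | In Quarters",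
    "---------|------------|----------|----------|----------|----------|------------"]
  let lines := lines ++ unit_times.map (rowLine default_dispatched)
  PySem.Str.join "\n" lines

-- ===== PRECONDITION & SPEC =====
def Spec_format_unit_times_table_py (unit_times : List (List (String × String))) (time_reported : String) (alarm_time : String) (out : String) : Prop := out = format_unit_times_table_py_alt unit_times time_reported alarm_time
instance (unit_times : List (List (String × String))) (time_reported : String) (alarm_time : String) (out : String) : Decidable (Spec_format_unit_times_table_py unit_times time_reported alarm_time out) := by unfold Spec_format_unit_times_table_py; infer_instance

-- ===== CLAIM (what is proved, stated in full; the proofs are below) =====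
def Claim_equal_format_unit_times_table_py : Prop := ∀ (unit_times : List (List (String × String))) (time_reported : String) (alarm_time : String), Dom_format_unit_times_table_py unit_times time_reported alarm_time → Spec_format_unit_times_table_py unit_times time_reported alarm_time (format_unit_times_table_py unit_times time_reported alarm_time)

-- ===== LEMMAS AND PROOFS =====

-- B's five-component fold is the tuple of five independent folds
theorem agg_split (l : List (List (String × String))) (o1 o2 o3 o4 o5 : Option String) :
    l.foldl (fun acc ut =>
      (updMin acc.1 (pyDictGet ut "paged" ""),
       updMin acc.2.1 (pyDictGet ut "enroute" ""),
       updMin acc.2.2.1 (pyDictGet ut "arrived" ""),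
       updMax acc.2.2.2.1 (pyDictGet ut "completed" ""),
       updMax acc.2.2.2.2 (pyDictGet ut "in_quarters" "")))
      (o1, o2, o3, o4, o5)
    = (l.foldl (fun o ut => updMin o (pyDictGet ut "paged" "")) o1,
       l.foldl (fun o ut => updMin o (pyDictGet ut "enroute" "")) o2,
       l.foldl (fun o ut => updMin o (pyDictGet ut "arrived" "")) o3,
       l.foldl (fun o ut => updMax o (pyDictGet ut "completed" "")) o4,
       l.foldl (fun o ut => updMax o (pyDictGet ut "in_quarters" "")) o5) := by
  induction l generalizing o1 o2 o3 o4 o5 with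
  | nil => rfl
  | cons ut t ih => simp only [List.foldl_cons]; exact ih _ _ _ _ _

theorem minfold_some (vs : List String) (a : String) :
    vs.foldl updMin (some a) = some ((vs.filter (fun v => decide (v ≠ ""))).foldl min a) := by
  induction vs generalizing a with
  | nil => rfl
  | cons v t ih =>
    by_cases h : v = "" <;> simp [updMin, h, List.foldl_cons, ih]

theorem maxfold_some (vs : List String) (a : String) :
    vs.foldl updMax (some a) = some ((vs.filter (fun v => decide (v ≠ ""))).foldl max a) := by
  induction vs generalizing a with
  | nil => rfl
  | cons v t ih =>
    by_cases h : v = "" <;> simp [updMax, h, List.foldl_cons, ih]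

theorem minfold_none (vs : List String) :
    vs.foldl updMin none
    = (match vs.filter (fun v => decide (v ≠ "")) with
       | [] => none
       | x :: t => some (t.foldl min x)) := by
  induction vs with
  | nil => rfl
  | cons v t ih =>
    by_cases h : v = ""
    · simpa [updMin, h] using ih
    · simp [updMin, h, minfold_some]

theorem maxfold_none (vs : List String) :
    vs.foldl updMax none
    = (match vs.filter (fun v => decide (v ≠ "")) with
       | [] => none
       | x :: t => some (t.foldl max x)) := by
  induction vs with
  | nil => rfl
  | cons v t ih =>
    by_cases h : v = ""
    · simpa [updMax, h] using ih
    · simp [updMax, h, maxfold_some]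

-- A's _earliest = Python `or` of B's running minimum with ""
theorem earliest_opt (uts : List (List (String × String))) (field : String) :
    earliestA uts field
    = optOr (uts.foldl (fun o ut => updMin o (pyDictGet ut field "")) none) "" := by
  have hmap : uts.foldl (fun o ut => updMin o (pyDictGet ut field "")) none
      = (uts.map (fun ut => pyDictGet ut field "")).foldl updMin none := by
    rw [List.foldl_map]
  have hval : (uts.filter (fun ut => decide (pyDictGet ut field "" ≠ ""))).map
        (fun ut => pyDictGet ut field "")
      = (uts.map (fun ut => pyDictGet ut field "")).filter (fun v => decide (v ≠ "")) := by
    rw [List.filter_map]; rfl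
  rw [hmap, minfold_none, earliestA]
  simp only [hval]
  cases hc : (uts.map (fun ut => pyDictGet ut field "")).filter (fun v => decide (v ≠ "")) with
  | nil => simp [optOr]
  | cons x t =>
    simp only [optOr, reduceCtorEq, PySem.List.min?_id_cons, Option.getD_some]
    by_cases h : t.foldl min x = "" <;> simp [h]

theorem latest_opt (uts : List (List (String × String))) (field : String) :
    latestA uts field
    = optOr (uts.foldl (fun o ut => updMax o (pyDictGet ut field "")) none) "" := by
  have hmap : uts.foldl (fun o ut => updMax o (pyDictGet ut field "")) none
      = (uts.map (fun ut => pyDictGet ut field "")).foldl updMax none := by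
    rw [List.foldl_map]
  have hval : (uts.filter (fun ut => decide (pyDictGet ut field "" ≠ ""))).map
        (fun ut => pyDictGet ut field "")
      = (uts.map (fun ut => pyDictGet ut field "")).filter (fun v => decide (v ≠ "")) := by
    rw [List.filter_map]; rfl
  rw [hmap, maxfold_none, latestA]
  simp only [hval]
  cases hc : (uts.map (fun ut => pyDictGet ut field "")).filter (fun v => decide (v ≠ "")) with
  | nil => simp [optOr]
  | cons x t =>
    simp only [optOr, reduceCtorEq, PySem.List.max?_id_cons, Option.getD_some]
    by_cases h : t.foldl max x = "" <;> simp [h]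

-- `(o or "") or alt` = `o or alt`
theorem pyOrS_optOr (o : Option String) (alt : String) :
    pyOrS (optOr o "") alt = optOr o alt := by
  cases o with
  | none => rfl
  | some v => by_cases h : v = "" <;> simp [pyOrS, optOr, h]

-- ===== VERDICT (by name: the statement is the Claim_ definition above) =====
theorem format_unit_times_table_py_spec : Claim_equal_format_unit_times_table_py := by
  intro uts tr al _
  unfold Spec_format_unit_times_table_py
  unfold format_unit_times_table_py format_unit_times_table_py_alt
  rw [agg_split]
  simp only [earliest_opt, latest_opt, pyOrS_optOr,
    PySem.List.foldl_append_singleton_eq_map, List.cons_append,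
    List.nil_append]
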